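-- pv_equiv track=rewrite | github.com/pypi-data/pypi-mirror-384 | packages/flarchitect/flarchitect-1.5.5-py3-none-any.whl/flarchitect/core/discovery.py | _deduplicate_endpoints
-- ===== SOURCE A (Python) =====
-- from typing import Any, Iterable
--
-- def _deduplicate_endpoints(endpoints: list[dict[str, Any]]) -> list[dict[str, Any]]:
--     seen: set[tuple[str, str]] = set()
--     unique: list[dict[str, Any]] = []
--     for entry in endpoints:
--         method = (entry.get("method") or "").upper()
--         url = entry.get("url") or ""
--         key = (method, url)
--         if key in seen:
--             continue
--         seen.add(key)
--         unique.append({"method": method, "url": url})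
--     return sorted(unique, key=lambda item: (item["url"], item["method"]))
-- ===== SOURCE B (Python) =====
-- def _deduplicate_endpoints(endpoints):
--     normalized = [
--         {"method": (entry.get("method") or "").upper(), "url": entry.get("url") or ""}
--         for entry in endpoints
--     ]
--     normalized.sort(key=lambda item: (item["url"], item["method"]))
--     result = []
--     for item in normalized:
--         if not result or result[-1] != item:
--             result.append(item)
--     return result
-- ===== Notes on version B (the rewrite author's own statement) =====
-- stated objective: alternative
-- what changed: Replaces A's seen-set first-occurrence dedup pass followed by sorting the unique list with: normalize every entry, sort the whole list by (url, method), then a single adjacent-deduplication pass over the sorted list.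
import Mathlib
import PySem

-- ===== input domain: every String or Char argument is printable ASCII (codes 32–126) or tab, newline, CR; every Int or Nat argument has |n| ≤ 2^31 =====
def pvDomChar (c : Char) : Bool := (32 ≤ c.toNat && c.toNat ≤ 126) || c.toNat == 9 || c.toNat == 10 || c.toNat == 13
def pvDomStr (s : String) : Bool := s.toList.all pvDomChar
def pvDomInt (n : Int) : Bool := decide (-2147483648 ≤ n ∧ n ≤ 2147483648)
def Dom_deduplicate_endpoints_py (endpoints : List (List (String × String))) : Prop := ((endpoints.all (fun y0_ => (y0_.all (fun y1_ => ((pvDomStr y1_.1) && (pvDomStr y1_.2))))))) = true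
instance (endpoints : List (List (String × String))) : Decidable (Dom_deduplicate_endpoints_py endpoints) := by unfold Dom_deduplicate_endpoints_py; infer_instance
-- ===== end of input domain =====

-- B replaces A's seen-set dedup pass followed by sorting the unique list with: normalize all entries,
-- sort the whole list, then one adjacent-deduplication pass (objective: alternative, same asymptotic cost).

-- ===== PORT A =====
-- loop body of A's 'for entry in endpoints' (seen-set dedup, first occurrences kept)
def pvStepA (st : PySem.Set (String × String) × List (List (String × String)))
    (entry : List (String × String)) :
    PySem.Set (String × String) × List (List (String × String)) :=
  -- (entry.get("method") or "").upper(): a missing key and the falsy "" both give "" — exactly Dict.getD with default ""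
  let method := PySem.Str.upper ((PySem.Dict.ofList entry).getD "method" "")
  let url := (PySem.Dict.ofList entry).getD "url" ""
  let key := (method, url)
  if key ∈ st.1 then st
  else (PySem.Set.add st.1 key, st.2 ++ [[("method", method), ("url", url)]])

def deduplicate_endpoints_py (endpoints : List (List (String × String))) :
    List (List (String × String)) :=
  let r := endpoints.foldl pvStepA (PySem.Set.empty, [])
  -- sorted(unique, key=lambda item: (item["url"], item["method"])); both keys are always present, so getD is exact
  PySem.List.sorted2 r.2 (fun item => (PySem.Dict.ofList item).getD "url" "")
    (fun item => (PySem.Dict.ofList item).getD "method" "")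

-- ===== PORT B =====
-- loop body of B's adjacent-dedup pass: 'if not result or result[-1] != item: result.append(item)'
def pvStepB (result : List (List (String × String))) (item : List (String × String)) :
    List (List (String × String)) :=
  if result = [] ∨ PySem.List.pyGet? result (-1) ≠ some item then result ++ [item] else result

def deduplicate_endpoints_py_alt (endpoints : List (List (String × String))) :
    List (List (String × String)) :=
  let normalized := endpoints.map (fun entry =>
    [("method", PySem.Str.upper ((PySem.Dict.ofList entry).getD "method" "")),
     ("url", (PySem.Dict.ofList entry).getD "url" "")])
  let sortedN := PySem.List.sorted2 normalized (fun item => (PySem.Dict.ofList item).getD "url" "")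
    (fun item => (PySem.Dict.ofList item).getD "method" "")
  sortedN.foldl pvStepB []

-- ===== PRECONDITION & SPEC =====
def Spec_deduplicate_endpoints_py (endpoints : List (List (String × String))) (out : List (List (String × String))) : Prop := out = deduplicate_endpoints_py_alt endpoints
instance (endpoints : List (List (String × String))) (out : List (List (String × String))) : Decidable (Spec_deduplicate_endpoints_py endpoints out) := by unfold Spec_deduplicate_endpoints_py; infer_instance

-- ===== CLAIM (what is proved, stated in full; the proofs are below) =====
def Claim_equal_deduplicate_endpoints_py : Prop := ∀ (endpoints : List (List (String × String))), Dom_deduplicate_endpoints_py endpoints → Spec_deduplicate_endpoints_py endpoints (deduplicate_endpoints_py endpoints)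

-- ===== LEMMAS AND PROOFS =====

-- the sort key (item["url"], item["method"]) as one lexicographic key
def pvKey (item : List (String × String)) : Lex (String × String) :=
  toLex ((PySem.Dict.ofList item).getD "url" "", (PySem.Dict.ofList item).getD "method" "")

-- the dedup key A computes per entry
def pvG (entry : List (String × String)) : String × String :=
  (PySem.Str.upper ((PySem.Dict.ofList entry).getD "method" ""),
   (PySem.Dict.ofList entry).getD "url" "")

-- the normalized dict both programs emit for a dedup key
def pvPi (p : String × String) : List (String × String) := [("method", p.1), ("url", p.2)]

theorem pvKey_pi (p : String × String) : pvKey (pvPi p) = toLex (p.2, p.1) := rfl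

theorem pvPi_inj : Function.Injective pvPi := by
  intro p q h
  simp only [pvPi, List.cons.injEq, Prod.mk.injEq, and_true, true_and] at h
  exact Prod.ext h.1 h.2

-- sorted2 with our two String keys is sorted with the lexicographic key
theorem pv_sorted2_eq_sorted (xs : List (List (String × String))) :
    PySem.List.sorted2 xs (fun item => (PySem.Dict.ofList item).getD "url" "")
      (fun item => (PySem.Dict.ofList item).getD "method" "")
    = PySem.List.sorted xs pvKey := by
  have hbf : (fun (a b : List (String × String)) =>
      (decide ((PySem.Dict.ofList a).getD "url" "" < (PySem.Dict.ofList b).getD "url" "") ||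
        (!decide ((PySem.Dict.ofList b).getD "url" "" < (PySem.Dict.ofList a).getD "url" "") &&
          decide ((PySem.Dict.ofList a).getD "method" "" < (PySem.Dict.ofList b).getD "method" ""))))
      = (fun a b => decide (pvKey a < pvKey b)) := by
    funext a b
    set u1 := (PySem.Dict.ofList a).getD "url" ""
    set u2 := (PySem.Dict.ofList b).getD "url" ""
    set m1 := (PySem.Dict.ofList a).getD "method" ""
    set m2 := (PySem.Dict.ofList b).getD "method" ""
    have hk : (pvKey a < pvKey b) ↔ (u1 < u2 ∨ (u1 = u2 ∧ m1 < m2)) := Prod.Lex.toLex_lt_toLex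
    by_cases h1 : u1 < u2
    · simp [h1, hk]
    · by_cases h2 : u2 < u1
      · have hne : ¬ u1 = u2 := by intro h; rw [h] at h2; exact lt_irrefl _ h2
        simp [h1, h2, hk, hne]
      · have heq : u1 = u2 := le_antisymm (le_of_not_gt h2) (le_of_not_gt h1)
        by_cases h3 : m1 < m2 <;> simp [h3, hk, heq]
  exact congrArg (fun bf => List.foldl (fun acc x => PySem.List.insertBy bf x acc) [] xs) hbf

-- A's loop keeps exactly the first occurrence of every dedup key, i.e. builds (ofList ∘ map pvG) mapped through pvPi
theorem pv_loopA (l : List (List (String × String))) (ks : List (String × String)) :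
    l.foldl pvStepA (PySem.Set.ofList ks, (PySem.Set.ofList ks).map pvPi)
      = (PySem.Set.ofList (ks ++ l.map pvG), (PySem.Set.ofList (ks ++ l.map pvG)).map pvPi) := by
  induction l generalizing ks with
  | nil => simp
  | cons e t ih =>
    have h1 : pvStepA (PySem.Set.ofList ks, (PySem.Set.ofList ks).map pvPi) e
        = (PySem.Set.ofList (ks ++ [pvG e]), (PySem.Set.ofList (ks ++ [pvG e])).map pvPi) := by
      rw [PySem.Set.ofList_append_singleton]
      show (if pvG e ∈ PySem.Set.ofList ks then (PySem.Set.ofList ks, (PySem.Set.ofList ks).map pvPi)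
          else (PySem.Set.add (PySem.Set.ofList ks) (pvG e),
            (PySem.Set.ofList ks).map pvPi ++ [pvPi (pvG e)]))
        = (PySem.Set.add (PySem.Set.ofList ks) (pvG e),
            (PySem.Set.add (PySem.Set.ofList ks) (pvG e)).map pvPi)
      by_cases hm : pvG e ∈ PySem.Set.ofList ks
      · rw [if_pos hm, PySem.Set.add_of_mem hm]
      · rw [if_neg hm, PySem.Set.add_of_not_mem hm, List.map_append]
        simp
    rw [List.foldl_cons, h1, ih (ks ++ [pvG e])]
    simp
-- B's adjacent-dedup pass over a key-sorted, key-injective list is exactly set insertion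
theorem pv_loopB (L : List (List (String × String))) :
    ∀ res : List (List (String × String)),
    res.Nodup →
    res.Pairwise (fun a b => pvKey a ≤ pvKey b) →
    L.Pairwise (fun a b => pvKey a ≤ pvKey b) →
    (∀ a ∈ res, ∀ b ∈ L, pvKey a ≤ pvKey b) →
    (∀ a, (a ∈ res ∨ a ∈ L) → ∀ b, (b ∈ res ∨ b ∈ L) → pvKey a = pvKey b → a = b) →
    L.foldl pvStepB res = PySem.Set.update res L := by
  induction L with
  | nil => intro res _ _ _ _ _; simp [PySem.Set.update]
  | cons i t ih =>
    intro res hnd hpw hLpw hRL hinj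
    have hstep : pvStepB res i = PySem.Set.add res i := by
      by_cases hm : i ∈ res
      · -- the last element of res has the same key as i, hence is i: no append
        rcases res.eq_nil_or_concat with hres | ⟨res', lst, hcat⟩
        · subst hres; cases hm
        · rw [List.concat_eq_append] at hcat; subst hcat
          have hlst_mem : lst ∈ res' ++ [lst] := List.mem_append_right _ (List.mem_singleton_self _)
          have h1 : pvKey lst ≤ pvKey i := hRL lst hlst_mem i (List.mem_cons_self ..)
          have h2 : pvKey i ≤ pvKey lst := by
            rcases List.mem_append.mp hm with h | h
            · exact (List.pairwise_append.mp hpw).2.2 i h lst (List.mem_singleton_self _)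
            · rw [List.mem_singleton.mp h]
          have : lst = i := hinj lst (Or.inl hlst_mem) i (Or.inr (List.mem_cons_self ..))
            (le_antisymm h1 h2)
          subst this
          rw [PySem.Set.add_of_mem hm]
          simp only [pvStepB]
          rw [if_neg]
          simp [PySem.List.pyGet?_neg_one_append_singleton]
      · rw [PySem.Set.add_of_not_mem hm]
        simp only [pvStepB]
        rcases res.eq_nil_or_concat with hres | ⟨res', lst, hcat⟩
        · subst hres; simp
        · rw [List.concat_eq_append] at hcat; subst hcat
          rw [if_pos]
          right
          rw [PySem.List.pyGet?_neg_one_append_singleton]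
          intro h
          exact hm (by rw [← Option.some.injEq _ _ |>.mp h]; exact List.mem_append_right _ (List.mem_singleton_self _))
    rw [List.foldl_cons, hstep, PySem.Set.update_cons]
    have hmem_add : ∀ a, a ∈ PySem.Set.add res i → a ∈ res ∨ a = i := by
      intro a ha; exact (PySem.Set.mem_add _ _ _).mp ha
    have hti : ∀ b ∈ t, pvKey i ≤ pvKey b := fun b hb => List.rel_of_pairwise_cons hLpw hb
    refine ih (PySem.Set.add res i) (PySem.Set.nodup_add res i hnd) ?_ (List.Pairwise.of_cons hLpw) ?_ ?_
    · rw [PySem.Set.add_eq_ite]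
      split
      · exact hpw
      · exact List.pairwise_append.mpr ⟨hpw, List.pairwise_singleton _ _,
          fun a ha b hb => by rw [List.mem_singleton.mp hb]; exact hRL a ha i (List.mem_cons_self ..)⟩
    · intro a ha b hb
      rcases hmem_add a ha with h | h
      · exact hRL a h b (List.mem_cons_of_mem _ hb)
      · rw [h]; exact hti b hb
    · intro a ha b hb
      have ha' : a ∈ res ∨ a ∈ i :: t := by
        rcases ha with h | h
        · rcases hmem_add a h with h' | h'
          · exact Or.inl h'
          · exact Or.inr (h' ▸ List.mem_cons_self ..)
        · exact Or.inr (List.mem_cons_of_mem _ h)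
      have hb' : b ∈ res ∨ b ∈ i :: t := by
        rcases hb with h | h
        · rcases hmem_add b h with h' | h'
          · exact Or.inl h'
          · exact Or.inr (h' ▸ List.mem_cons_self ..)
        · exact Or.inr (List.mem_cons_of_mem _ h)
      exact hinj a ha' b hb'

theorem pv_ofList_sublist {α : Type} [BEq α] [LawfulBEq α] (xs : List α) :
    (PySem.Set.ofList xs).Sublist xs := by
  induction xs with
  | nil => simp [PySem.Set.ofList]
  | cons x t ih =>
    rw [PySem.Set.ofList_cons]
    refine List.Sublist.cons₂ x (List.Sublist.trans ?_ ih)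
    simp [PySem.Set.discard]

-- ≤-sorted + no duplicates + key-injective on members ⇒ strictly key-sorted
theorem pv_pairwise_lt (L : List (List (String × String)))
    (hle : L.Pairwise (fun a b => pvKey a ≤ pvKey b)) (hnd : L.Nodup)
    (hinj : ∀ a ∈ L, ∀ b ∈ L, pvKey a = pvKey b → a = b) :
    L.Pairwise (fun a b => pvKey a < pvKey b) := by
  have h := hle.and hnd
  refine h.imp_of_mem ?_
  intro a b ha hb ⟨h1, h2⟩
  exact lt_of_le_of_ne h1 (fun he => h2 (hinj a ha b hb he))

-- every member of the normalized list is a pvPi-image, so pvKey is injective on its members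
theorem pv_inj_on_map (endpoints : List (List (String × String)))
    (a : List (String × String)) (ha : a ∈ (endpoints.map pvG).map pvPi)
    (b : List (String × String)) (hb : b ∈ (endpoints.map pvG).map pvPi)
    (h : pvKey a = pvKey b) : a = b := by
  rcases List.mem_map.mp ha with ⟨p, _, rfl⟩
  rcases List.mem_map.mp hb with ⟨q, _, rfl⟩
  rw [pvKey_pi, pvKey_pi] at h
  have : (p.2, p.1) = (q.2, q.1) := by exact_mod_cast h
  have hpq : p = q := Prod.ext (congrArg Prod.snd this) (congrArg Prod.fst this)
  rw [hpq]

-- ===== VERDICT (by name: the statement is the Claim_ definition above) =====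
theorem deduplicate_endpoints_py_spec : Claim_equal_deduplicate_endpoints_py := by
  intro endpoints _
  unfold Spec_deduplicate_endpoints_py
  -- abbreviations
  set G : List (String × String) := endpoints.map pvG with hG
  have hNmap : endpoints.map (fun entry =>
      [("method", PySem.Str.upper ((PySem.Dict.ofList entry).getD "method" "")),
       ("url", (PySem.Dict.ofList entry).getD "url" "")]) = G.map pvPi := by
    rw [hG, List.map_map]; rfl
  set N : List (List (String × String)) := G.map pvPi with hN
  set L' : List (List (String × String)) := PySem.List.sorted N pvKey with hL'
  -- B computes ofList L'
  have hB : deduplicate_endpoints_py_alt endpoints = PySem.Set.ofList L' := by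
    unfold deduplicate_endpoints_py_alt
    simp only [hNmap, pv_sorted2_eq_sorted, ← hL']
    rw [pv_loopB L' [] List.nodup_nil (List.Pairwise.nil)
      (PySem.List.sorted_pairwise N pvKey) (by intro a ha; cases ha)
      (by
        intro a ha b hb h
        have ha' : a ∈ N := by
          rcases ha with h' | h'
          · cases h'
          · exact (PySem.List.mem_sorted N pvKey false _).mp h'
        have hb' : b ∈ N := by
          rcases hb with h' | h'
          · cases h'
          · exact (PySem.List.mem_sorted N pvKey false _).mp h'
        exact pv_inj_on_map endpoints a ha' b hb' h)]
    rw [PySem.Set.update_nil_left]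
  -- A computes sorted of the first-occurrence dedup
  have hA : deduplicate_endpoints_py endpoints
      = PySem.List.sorted ((PySem.Set.ofList G).map pvPi) pvKey := by
    unfold deduplicate_endpoints_py
    have h0 : (PySem.Set.empty : PySem.Set (String × String)) = PySem.Set.ofList []
      := rfl
    have h0' : ([] : List (List (String × String))) = (PySem.Set.ofList ([] : List (String × String))).map pvPi := rfl
    rw [h0]
    conv_lhs => rw [h0']
    rw [pv_loopA endpoints []]
    simp only [List.nil_append, pv_sorted2_eq_sorted, ← hG]
  -- the two sides are the same strictly sorted list
  have hperm : (PySem.Set.ofList L').Perm ((PySem.Set.ofList G).map pvPi) := by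
    refine (List.perm_ext_iff_of_nodup (PySem.Set.nodup_ofList _)
      ((PySem.Set.nodup_ofList _).map pvPi_inj)).mpr ?_
    intro x
    rw [PySem.Set.mem_ofList, hL', PySem.List.mem_sorted, hN]
    constructor
    · intro hx
      rcases List.mem_map.mp hx with ⟨p, hp, rfl⟩
      exact List.mem_map_of_mem ((PySem.Set.mem_ofList _ _).mpr hp)
    · intro hx
      rcases List.mem_map.mp hx with ⟨p, hp, rfl⟩
      exact List.mem_map_of_mem ((PySem.Set.mem_ofList _ _).mp hp)
  have hpw : (PySem.Set.ofList L').Pairwise (fun a b => pvKey a < pvKey b) := by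
    have hsub : (PySem.Set.ofList L').Sublist L' := pv_ofList_sublist L'
    refine pv_pairwise_lt _ ((PySem.List.sorted_pairwise N pvKey).sublist hsub)
      (PySem.Set.nodup_ofList _) ?_
    intro a ha b hb h
    have ha' : a ∈ N := (PySem.List.mem_sorted N pvKey false _).mp (hsub.mem ha)
    have hb' : b ∈ N := (PySem.List.mem_sorted N pvKey false _).mp (hsub.mem hb)
    exact pv_inj_on_map endpoints a ha' b hb' h
  rw [hA, hB]
  exact PySem.List.sorted_eq_of_perm_of_pairwise_lt _ _ pvKey hperm hpw
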